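-- pv_equiv track=rewrite | github.com/Jyuqi/AutoULTGen | Client/cmd_validation/htoxml/mvfiles.py | equal_list
-- ===== SOURCE A (Python) =====
-- def equal_list(l1, l2, ignored):
--     #compare 2 lists after ignoring some keywords
--     if 'CHECK' in l1:
--         l1.remove('CHECK')
--         l1.append('ON')
--         l1.append('OFF')
--     if 'CHECK' in l2:
--         l2.remove('CHECK')
--         l2.append('ON')
--         l2.append('OFF')
--
--     ignored = set(ignored)
--     for k1 in l1:
--         if k1 not in ignored and k1 not in l2:
--             return False
--     for k2 in l2:
--         if k2 not in ignored and k2 not in l1: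
--             return False
--     return True
-- ===== SOURCE B (Python) =====
-- def equal_list(l1, l2, ignored):
--     # compare 2 lists after ignoring some keywords
--     # same CHECK -> ON/OFF mutation prologue as A (same in-place side effects)
--     if 'CHECK' in l1:
--         l1.remove('CHECK')
--         l1.append('ON')
--         l1.append('OFF')
--     if 'CHECK' in l2:
--         l2.remove('CHECK')
--         l2.append('ON')
--         l2.append('OFF')
--
--     ig = set(ignored)
--     return set(l1) - ig == set(l2) - ig
-- ===== Notes on version B (the rewrite author's own statement) =====
-- stated objective: simpler
-- what changed: Replaces the two asymmetric directional membership loops (each scanning the other list per element) with one symmetric comparison of the two ignored-filtered sets; the mutation prologue is kept verbatim so side effects are identical.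
import Mathlib
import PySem

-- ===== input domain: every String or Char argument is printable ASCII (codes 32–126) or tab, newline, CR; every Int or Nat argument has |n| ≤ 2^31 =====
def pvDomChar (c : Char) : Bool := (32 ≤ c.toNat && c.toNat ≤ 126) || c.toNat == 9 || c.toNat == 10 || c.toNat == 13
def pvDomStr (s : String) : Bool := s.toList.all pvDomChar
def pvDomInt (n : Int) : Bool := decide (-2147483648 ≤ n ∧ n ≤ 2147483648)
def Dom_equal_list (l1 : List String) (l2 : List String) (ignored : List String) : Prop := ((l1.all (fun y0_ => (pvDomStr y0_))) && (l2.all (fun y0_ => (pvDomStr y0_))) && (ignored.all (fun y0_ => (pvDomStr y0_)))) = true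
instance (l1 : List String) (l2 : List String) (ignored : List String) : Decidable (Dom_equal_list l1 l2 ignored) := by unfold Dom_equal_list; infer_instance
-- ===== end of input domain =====

-- B replaces A's two directional membership loops with one symmetric equality of the two
-- ignored-filtered sets (simpler); the CHECK→ON/OFF mutation prologue is identical in both, so
-- with identical in-place side effects; the equivalence proved here is about the return value.

-- ===== PORT A =====
-- the CHECK→ON/OFF prologue, identical in both Pythons (mutation modelled by rebinding)
def pvCheckFix (l : List String) : List String :=
  if l.contains "CHECK" then ((PySem.List.remove? l "CHECK").getD l) ++ ["ON", "OFF"] else l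

-- 'for k1 in l: if k1 not in igs and k1 not in other: return False' (true = fell through)
def pvScan (igs other : List String) : List String → Bool
  | [] => true
  | k :: ks => if ¬ PySem.Set.contains igs k ∧ ¬ other.contains k then false else pvScan igs other ks

def equal_list (l1 : List String) (l2 : List String) (ignored : List String) : Bool :=
  let l1' := pvCheckFix l1
  let l2' := pvCheckFix l2
  let igs : PySem.Set String := PySem.Set.ofList ignored
  if pvScan igs l2' l1' then pvScan igs l1' l2' else false

-- ===== PORT B =====
def equal_list_alt (l1 : List String) (l2 : List String) (ignored : List String) : Bool :=
  let l1' := pvCheckFix l1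
  let l2' := pvCheckFix l2
  let ig : PySem.Set String := PySem.Set.ofList ignored
  PySem.Set.equal (PySem.Set.diff (PySem.Set.ofList l1') ig) (PySem.Set.diff (PySem.Set.ofList l2') ig)

-- ===== PRECONDITION & SPEC =====
def Spec_equal_list (l1 : List String) (l2 : List String) (ignored : List String) (out : Bool) : Prop := out = equal_list_alt l1 l2 ignored
instance (l1 : List String) (l2 : List String) (ignored : List String) (out : Bool) : Decidable (Spec_equal_list l1 l2 ignored out) := by unfold Spec_equal_list; infer_instance

-- ===== CLAIM (what is proved, stated in full; the proofs are below) =====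
def Claim_equal_equal_list : Prop := ∀ (l1 : List String) (l2 : List String) (ignored : List String), Dom_equal_list l1 l2 ignored → Spec_equal_list l1 l2 ignored (equal_list l1 l2 ignored)

-- ===== LEMMAS AND PROOFS =====

theorem pvScan_eq_true_iff (igs other l : List String) :
    pvScan igs other l = true ↔ ∀ k ∈ l, k ∈ igs ∨ k ∈ other := by
  induction l with
  | nil => simp [pvScan]
  | cons k ks ih =>
    simp only [pvScan]
    split_ifs with h
    · simp only [false_iff, not_forall]
      refine ⟨k, List.mem_cons_self .., ?_⟩
      rintro (h1 | h2)
      · exact h.1 ((PySem.Set.contains_iff ..).2 h1)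
      · exact h.2 (List.contains_iff_mem.2 h2)
    · rw [ih]
      constructor
      · intro hall k' hk'
        rcases List.mem_cons.1 hk' with rfl | hk'
        · by_cases hig : k' ∈ igs
          · exact Or.inl hig
          · refine Or.inr ?_
            by_contra hon
            exact h ⟨fun hc => hig ((PySem.Set.contains_iff ..).1 hc),
                     fun hc => hon (List.contains_iff_mem.1 hc)⟩
        · exact hall k' hk'
      · intro hall k' hk'
        exact hall k' (List.mem_cons_of_mem _ hk')

theorem core_eq (l1' l2' ignored : List String) :
    (if pvScan (PySem.Set.ofList ignored) l2' l1' then pvScan (PySem.Set.ofList ignored) l1' l2' else false) =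
    PySem.Set.equal (PySem.Set.diff (PySem.Set.ofList l1') (PySem.Set.ofList ignored))
      (PySem.Set.diff (PySem.Set.ofList l2') (PySem.Set.ofList ignored)) := by
  have hmem : ∀ (l : List String) (x : String),
      x ∈ PySem.Set.diff (PySem.Set.ofList l) (PySem.Set.ofList ignored) ↔ x ∈ l ∧ x ∉ ignored := by
    intro l x
    rw [PySem.Set.mem_diff, PySem.Set.mem_ofList, PySem.Set.mem_ofList]
  by_cases h1 : pvScan (PySem.Set.ofList ignored) l2' l1' = true
  · by_cases h2 : pvScan (PySem.Set.ofList ignored) l1' l2' = true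
    · rw [h1, if_pos rfl, h2]
      symm
      rw [PySem.Set.equal_iff]
      intro x
      rw [hmem, hmem]
      have a1 := (pvScan_eq_true_iff _ _ _).1 h1
      have a2 := (pvScan_eq_true_iff _ _ _).1 h2
      constructor
      · rintro ⟨hx, hni⟩
        refine ⟨?_, hni⟩
        rcases a1 x hx with hig | hx2
        · exact absurd ((PySem.Set.mem_ofList _ _).1 hig) hni
        · exact hx2
      · rintro ⟨hx, hni⟩
        refine ⟨?_, hni⟩
        rcases a2 x hx with hig | hx1
        · exact absurd ((PySem.Set.mem_ofList _ _).1 hig) hni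
        · exact hx1
    · rw [h1, if_pos rfl, Bool.eq_false_iff.2 h2]
      symm
      rw [Bool.eq_false_iff, Ne, PySem.Set.equal_iff]
      intro hset
      apply h2
      rw [pvScan_eq_true_iff]
      intro k hk
      by_cases hig : k ∈ ignored
      · exact Or.inl ((PySem.Set.mem_ofList _ _).2 hig)
      · exact Or.inr (((hmem l1' k).1 (((hset k).2 ((hmem l2' k).2 ⟨hk, hig⟩)))).1)
  · rw [Bool.eq_false_iff.2 h1, if_neg (by simp)]
    symm
    rw [Bool.eq_false_iff, Ne, PySem.Set.equal_iff]
    intro hset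
    apply h1
    rw [pvScan_eq_true_iff]
    intro k hk
    by_cases hig : k ∈ ignored
    · exact Or.inl ((PySem.Set.mem_ofList _ _).2 hig)
    · exact Or.inr (((hmem l2' k).1 (((hset k).1 ((hmem l1' k).2 ⟨hk, hig⟩)))).1)

-- ===== VERDICT (by name: the statement is the Claim_ definition above) =====
theorem equal_list_spec : Claim_equal_equal_list := by
  intro l1 l2 ignored _
  unfold Spec_equal_list equal_list equal_list_alt
  exact core_eq (pvCheckFix l1) (pvCheckFix l2) ignored
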